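-- pv_equiv track=rewrite | github.com/AliceC-7504/0_eller_1 | functions.py | seqs
-- ===== SOURCE A (Python) =====
-- def maxSeq(arr): # Calculates max streak in sequence
--     maxLength = 0
--     for i in range(len(arr)):
--         count = 0
--         streak = True
--         while streak == True:
--             if i+count<len(arr):
--                 if arr[i]==arr[i+count]:
--                     count = count+1
--                 else:
--                     streak=False
--             else:
--                 streak=False
--         if count>maxLength:
--             maxLength=count
--     return maxLength
--
-- def seqs(arr): # Returns a list with amount of each streak, [amount with direct switch, 2 in a row, 3 in a row...]
--     maxLength = maxSeq(arr)
--     result = list()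
--     for i in range(maxLength):
--         result.append(0)
--     index = 0
--     while index < len(arr):
--         for j in range(maxLength):
--             k=j+1
--             if index+k<len(arr):
--                 if arr[index] != arr[index+k]:
--                     result[j] = result[j]+1
--                     index = index+k
--                     break
--             else:
--                 result[j] = result[j]+1
--                 index = index+maxLength
--                 break
--     return result
-- ===== SOURCE B (Python) =====
-- def seqs(arr):
--     # Single linear pass: collect run lengths, then bucket-count them.
--     n = len(arr)
--     runs = []
--     i = 0
--     while i < n:
--         j = i
--         while j < n and arr[j] == arr[i]:
--             j += 1
--         runs.append(j - i)
--         i = j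
--     if not runs:
--         return []
--     result = [0] * max(runs)
--     for r in runs:
--         result[r - 1] += 1
--     return result
-- ===== Notes on version B (the rewrite author's own statement) =====
-- stated objective: faster
-- what changed: Replaces the quadratic maxSeq-then-rescan structure (per-index streak recount plus an inner per-bucket scan) by a single linear pass that collects run lengths once and bucket-counts them.
import Mathlib
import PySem

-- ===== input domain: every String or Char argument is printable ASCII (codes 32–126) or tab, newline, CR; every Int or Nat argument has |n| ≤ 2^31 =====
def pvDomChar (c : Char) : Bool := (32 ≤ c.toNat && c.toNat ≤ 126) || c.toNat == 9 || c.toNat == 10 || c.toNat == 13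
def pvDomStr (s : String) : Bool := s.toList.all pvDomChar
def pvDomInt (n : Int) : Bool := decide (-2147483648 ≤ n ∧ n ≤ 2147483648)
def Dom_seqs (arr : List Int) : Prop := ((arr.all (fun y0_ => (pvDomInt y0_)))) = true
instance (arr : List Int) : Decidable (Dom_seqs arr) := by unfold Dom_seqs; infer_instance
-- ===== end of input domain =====

-- B replaces A's quadratic maxSeq-then-rescan structure by one linear pass that collects
-- run lengths and bucket-counts them (objective: faster, asymptotic).

-- ===== PORT A =====
-- inner `while streak` of maxSeq: counts how far arr[i+count] keeps equalling arr[i].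
-- Indices are nonnegative and guarded in range, so getD is exact for arr[...] here.
def maxSeqCount (arr : List Int) (i : Nat) (count : Nat) : Nat :=
  if _h : i + count < arr.length then
    if arr.getD i 0 = arr.getD (i + count) 0 then maxSeqCount arr i (count + 1) else count
  else count
termination_by arr.length - (i + count)

-- maxSeq: for-loop over range(len(arr)), keeping the running maximum count.
def seqs_maxSeq (arr : List Int) : Nat :=
  (List.range arr.length).foldl
    (fun maxLength i =>
      let count := maxSeqCount arr i 0
      if maxLength < count then count else maxLength) 0

-- inner `for j in range(maxLength)` of seqs, returning (result, index) at the break.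
def seqs_inner (arr : List Int) (ml : Nat) (result : List Int) (index : Nat) (j : Nat) :
    List Int × Nat :=
  if _h : j < ml then
    let k := j + 1
    if index + k < arr.length then
      if arr.getD index 0 ≠ arr.getD (index + k) 0 then
        (result.set j (result.getD j 0 + 1), index + k)
      else seqs_inner arr ml result index (j + 1)
    else (result.set j (result.getD j 0 + 1), index + ml)
  else (result, index)
termination_by ml - j

-- outer `while index < len(arr)`; fuel (= len(arr), enough: index grows each pass) only
-- makes the recursion total, it never changes the computed value on any input.
def seqs_outer (arr : List Int) (ml : Nat) : Nat → List Int → Nat → List Int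
  | 0, result, _ => result
  | fuel + 1, result, index =>
    if index < arr.length then
      let p := seqs_inner arr ml result index 0
      seqs_outer arr ml fuel p.1 p.2
    else result

def seqs (arr : List Int) : List Int :=
  let maxLength := seqs_maxSeq arr
  seqs_outer arr maxLength arr.length (List.replicate maxLength (0 : Int)) 0

-- ===== PORT B =====
-- inner `while j < n and arr[j] == arr[i]` of Source B (v = arr[i]).
def runEndFrom (arr : List Int) (v : Int) (j : Nat) : Nat :=
  if _h : j < arr.length then
    if arr.getD j 0 = v then runEndFrom arr v (j + 1) else j
  else j
termination_by arr.length - j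

-- the port's outer while needs these to terminate: j never retreats, and strictly
-- advances past i when it starts at an in-range i
theorem runEndFrom_ge (arr : List Int) (v : Int) (j : Nat) : j ≤ runEndFrom arr v j := by
  have H : ∀ d j, arr.length - j ≤ d → j ≤ runEndFrom arr v j := by
    intro d
    induction d with
    | zero =>
      intro j hj
      rw [runEndFrom]
      split
      · exfalso; omega
      · omega
    | succ d ih =>
      intro j hj
      rw [runEndFrom]
      split
      · split
        · have := ih (j + 1) (by omega); omega
        · omega
      · omega
  exact H (arr.length - j) j le_rfl

theorem runEndFrom_advance (arr : List Int) (i : Nat) (h : i < arr.length) :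
    i < runEndFrom arr (arr.getD i 0) i := by
  rw [runEndFrom, dif_pos h, if_pos rfl]
  have := runEndFrom_ge arr (arr.getD i 0) (i + 1)
  omega

-- outer `while i < n` of Source B: the list of run lengths.
def seqs_runs (arr : List Int) (i : Nat) : List Nat :=
  if h : i < arr.length then
    let j := runEndFrom arr (arr.getD i 0) i
    (j - i) :: seqs_runs arr j
  else []
termination_by arr.length - i
decreasing_by exact Nat.sub_lt_sub_left h (runEndFrom_advance arr i h)

def seqs_alt (arr : List Int) : List Int :=
  let runs := seqs_runs arr 0
  match runs with
  | [] => []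
  | r0 :: rest =>
    -- max(runs) is Python's running maximum over the list
    let m := rest.foldl Nat.max r0
    runs.foldl (fun result r => result.set (r - 1) (result.getD (r - 1) 0 + 1))
      (List.replicate m (0 : Int))

-- ===== PRECONDITION & SPEC =====
def Spec_seqs (arr : List Int) (out : List Int) : Prop := out = seqs_alt arr
instance (arr : List Int) (out : List Int) : Decidable (Spec_seqs arr out) := by
  unfold Spec_seqs; infer_instance

-- ===== CLAIM (what is proved, stated in full; the proofs are below) =====
def Claim_equal_seqs : Prop := ∀ (arr : List Int), Dom_seqs arr → Spec_seqs arr (seqs arr)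

-- ===== LEMMAS AND PROOFS =====

-- basic facts about runEndFrom -------------------------------------------------

theorem runEndFrom_le (arr : List Int) (v : Int) (j : Nat) (hj : j ≤ arr.length) :
    runEndFrom arr v j ≤ arr.length := by
  have H : ∀ d j, arr.length - j ≤ d → j ≤ arr.length → runEndFrom arr v j ≤ arr.length := by
    intro d
    induction d with
    | zero =>
      intro j h1 h2
      rw [runEndFrom]
      split
      · exfalso; omega
      · omega
    | succ d ih =>
      intro j h1 h2
      rw [runEndFrom]
      split
      · split
        · exact ih (j + 1) (by omega) (by omega)
        · omega
      · omega
  exact H (arr.length - j) j le_rfl hj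

theorem runEndFrom_eq_v (arr : List Int) (v : Int) (j t : Nat) (h1 : j ≤ t)
    (h2 : t < runEndFrom arr v j) : arr.getD t 0 = v := by
  have H : ∀ d j, arr.length - j ≤ d → ∀ t, j ≤ t → t < runEndFrom arr v j →
      arr.getD t 0 = v := by
    intro d
    induction d with
    | zero =>
      intro j h1 t ht h2
      rw [runEndFrom] at h2
      split at h2
      · exfalso; omega
      · exfalso; omega
    | succ d ih =>
      intro j h1 t ht h2
      rw [runEndFrom] at h2
      split at h2
      · rename_i hjlt
        split at h2
        · rename_i heq
          rcases Nat.eq_or_lt_of_le ht with hjt | hjt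
          · exact hjt ▸ heq
          · exact ih (j + 1) (by omega) t (by omega) h2
        · exfalso; omega
      · exfalso; omega
  exact H (arr.length - j) j le_rfl t h1 h2

theorem runEndFrom_stop (arr : List Int) (v : Int) (j : Nat)
    (h : runEndFrom arr v j < arr.length) : arr.getD (runEndFrom arr v j) 0 ≠ v := by
  have H : ∀ d j, arr.length - j ≤ d → runEndFrom arr v j < arr.length →
      arr.getD (runEndFrom arr v j) 0 ≠ v := by
    intro d
    induction d with
    | zero =>
      intro j h1 h2
      exfalso
      have := runEndFrom_ge arr v j
      omega
    | succ d ih =>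
      intro j h1 h2
      by_cases hjlt : j < arr.length
      · by_cases heq : arr.getD j 0 = v
        · have hrw : runEndFrom arr v j = runEndFrom arr v (j + 1) := by
            rw [runEndFrom, dif_pos hjlt, if_pos heq]
          rw [hrw]
          exact ih (j + 1) (by omega) (hrw ▸ h2)
        · have hrw : runEndFrom arr v j = j := by
            rw [runEndFrom, dif_pos hjlt, if_neg heq]
          rw [hrw]
          exact heq
      · exfalso
        have hrw : runEndFrom arr v j = j := by
          rw [runEndFrom, dif_neg hjlt]
        rw [hrw] at h2
        exact hjlt h2
  exact H (arr.length - j) j le_rfl h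

theorem runEndFrom_idem (arr : List Int) (v : Int) (j : Nat) :
    runEndFrom arr v (runEndFrom arr v j) = runEndFrom arr v j := by
  by_cases h : runEndFrom arr v j < arr.length
  · rw [runEndFrom, dif_pos h, if_neg (runEndFrom_stop arr v j h)]
  · rw [runEndFrom, dif_neg h]

theorem runEndFrom_stable (arr : List Int) (v : Int) (j t : Nat) (h1 : j ≤ t)
    (h2 : t ≤ runEndFrom arr v j) : runEndFrom arr v t = runEndFrom arr v j := by
  have H : ∀ d t, runEndFrom arr v j - t ≤ d → j ≤ t → t ≤ runEndFrom arr v j →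
      runEndFrom arr v t = runEndFrom arr v j := by
    intro d
    induction d with
    | zero =>
      intro t h0 ht1 ht2
      have : t = runEndFrom arr v j := by omega
      rw [this, runEndFrom_idem]
    | succ d ih =>
      intro t h0 ht1 ht2
      rcases Nat.eq_or_lt_of_le ht2 with he | hlt
      · rw [he, runEndFrom_idem]
      · have htn : t < arr.length := by
          have := runEndFrom_le arr v j (by
            by_contra hc
            rw [runEndFrom, dif_neg (by omega)] at hlt
            omega)
          omega
        rw [runEndFrom, dif_pos htn, if_pos (runEndFrom_eq_v arr v j t ht1 hlt)]
        exact ih (t + 1) (by omega) (by omega) (by omega)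
  exact H (runEndFrom arr v j - t) t le_rfl h1 h2

-- A's streak counter is the distance to the run end ----------------------------

theorem maxSeqCount_eq (arr : List Int) (i : Nat) (c : Nat) :
    maxSeqCount arr i c = runEndFrom arr (arr.getD i 0) (i + c) - i := by
  have H : ∀ d c, arr.length - (i + c) ≤ d →
      maxSeqCount arr i c = runEndFrom arr (arr.getD i 0) (i + c) - i := by
    intro d
    induction d with
    | zero =>
      intro c h1
      rw [maxSeqCount, dif_neg (by omega), runEndFrom, dif_neg (by omega)]
      omega
    | succ d ih =>
      intro c h1
      by_cases hlt : i + c < arr.length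
      · by_cases heq : arr.getD i 0 = arr.getD (i + c) 0
        · rw [maxSeqCount, dif_pos hlt, if_pos heq, runEndFrom, dif_pos hlt, if_pos heq.symm]
          exact ih (c + 1) (by omega)
        · rw [maxSeqCount, dif_pos hlt, if_neg heq, runEndFrom, dif_pos hlt,
            if_neg (fun hx => heq hx.symm)]
          omega
      · rw [maxSeqCount, dif_neg hlt, runEndFrom, dif_neg hlt]
        omega
  exact H (arr.length - (i + c)) c le_rfl

-- clean unfoldings of the run list --------------------------------------------

theorem seqs_runs_pos (arr : List Int) (i : Nat) (h : i < arr.length) :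
    seqs_runs arr i =
      (runEndFrom arr (arr.getD i 0) i - i) ::
        seqs_runs arr (runEndFrom arr (arr.getD i 0) i) := by
  rw [seqs_runs]
  simp [h]

theorem seqs_runs_nil (arr : List Int) (i : Nat) (h : ¬ i < arr.length) :
    seqs_runs arr i = [] := by
  rw [seqs_runs]
  simp [h]

-- facts about the run list -----------------------------------------------------

theorem seqs_runs_length (arr : List Int) (i : Nat) :
    (seqs_runs arr i).length ≤ arr.length - i := by
  have H : ∀ d i, arr.length - i ≤ d → (seqs_runs arr i).length ≤ arr.length - i := by
    intro d
    induction d with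
    | zero =>
      intro i h1
      rw [seqs_runs_nil arr i (by omega)]
      simp
    | succ d ih =>
      intro i h1
      by_cases hi : i < arr.length
      · rw [seqs_runs_pos arr i hi]
        have hadv := runEndFrom_advance arr i hi
        have := ih (runEndFrom arr (arr.getD i 0) i) (by omega)
        simp only [List.length_cons]
        omega
      · rw [seqs_runs_nil arr i hi]
        simp
  exact H (arr.length - i) i le_rfl

-- A's running maximum ----------------------------------------------------------

theorem foldl_maxstep_ge_acc (g : Nat → Nat) (l : List Nat) (acc : Nat) :
    acc ≤ l.foldl (fun m i => Nat.max m (g i)) acc := by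
  induction l generalizing acc with
  | nil => exact le_rfl
  | cons a l ih =>
    simp only [List.foldl_cons]
    exact le_trans (Nat.le_max_left acc (g a)) (ih (Nat.max acc (g a)))

theorem foldl_maxstep_ge_mem (g : Nat → Nat) (l : List Nat) (acc : Nat) (i : Nat)
    (h : i ∈ l) : g i ≤ l.foldl (fun m i => Nat.max m (g i)) acc := by
  induction l generalizing acc with
  | nil => cases h
  | cons a l ih =>
    simp only [List.foldl_cons]
    rcases List.mem_cons.mp h with rfl | hmem
    · exact le_trans (Nat.le_max_right acc (g i)) (foldl_maxstep_ge_acc g l _)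
    · exact ih _ hmem

theorem seqs_maxSeq_eq_fold (arr : List Int) :
    seqs_maxSeq arr =
      (List.range arr.length).foldl
        (fun m i => Nat.max m (runEndFrom arr (arr.getD i 0) i - i)) 0 := by
  unfold seqs_maxSeq
  congr 1
  funext m i
  show (if m < maxSeqCount arr i 0 then maxSeqCount arr i 0 else m) =
    Nat.max m (runEndFrom arr (arr.getD i 0) i - i)
  rw [maxSeqCount_eq]
  simp only [Nat.add_zero]
  split_ifs with hlt
  · exact (Nat.max_eq_right (Nat.le_of_lt hlt)).symm
  · exact (Nat.max_eq_left (Nat.not_lt.mp hlt)).symm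

theorem maxSeq_ge (arr : List Int) (i : Nat) (hi : i < arr.length) :
    runEndFrom arr (arr.getD i 0) i - i ≤ seqs_maxSeq arr := by
  rw [seqs_maxSeq_eq_fold]
  exact foldl_maxstep_ge_mem (fun i => runEndFrom arr (arr.getD i 0) i - i)
    (List.range arr.length) 0 i (List.mem_range.mpr hi)

theorem seqs_runs_bounds (arr : List Int) (i : Nat) (r : Nat) (h : r ∈ seqs_runs arr i) :
    1 ≤ r ∧ r ≤ seqs_maxSeq arr := by
  have H : ∀ d i, arr.length - i ≤ d → ∀ r, r ∈ seqs_runs arr i →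
      1 ≤ r ∧ r ≤ seqs_maxSeq arr := by
    intro d
    induction d with
    | zero =>
      intro i h1 r hr
      rw [seqs_runs_nil arr i (by omega)] at hr
      cases hr
    | succ d ih =>
      intro i h1 r hr
      by_cases hi : i < arr.length
      · rw [seqs_runs_pos arr i hi] at hr
        have hadv := runEndFrom_advance arr i hi
        rcases List.mem_cons.mp hr with rfl | hmem
        · exact ⟨by omega, maxSeq_ge arr i hi⟩
        · exact ih (runEndFrom arr (arr.getD i 0) i) (by omega) r hmem
      · rw [seqs_runs_nil arr i hi] at hr
        cases hr
  exact H (arr.length - i) i le_rfl r h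

-- the inner for-loop of A: one run, one bucket increment -----------------------

theorem inner_last (arr : List Int) (ml : Nat) (result : List Int) (i : Nat)
    (hi : i < arr.length) (hml : runEndFrom arr (arr.getD i 0) i - i ≤ ml) :
    seqs_inner arr ml result i (runEndFrom arr (arr.getD i 0) i - i - 1) =
      (result.set (runEndFrom arr (arr.getD i 0) i - i - 1)
         (result.getD (runEndFrom arr (arr.getD i 0) i - i - 1) 0 + 1),
       if runEndFrom arr (arr.getD i 0) i < arr.length then runEndFrom arr (arr.getD i 0) i
       else i + ml) := by
  have hadv := runEndFrom_advance arr i hi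
  have hle := runEndFrom_le arr (arr.getD i 0) i (by omega)
  rw [seqs_inner, dif_pos (show runEndFrom arr (arr.getD i 0) i - i - 1 < ml by omega)]
  show (if i + (runEndFrom arr (arr.getD i 0) i - i - 1 + 1) < arr.length then _ else _) = _
  have hik : i + (runEndFrom arr (arr.getD i 0) i - i - 1 + 1) =
      runEndFrom arr (arr.getD i 0) i := by omega
  rw [hik]
  by_cases hen : runEndFrom arr (arr.getD i 0) i < arr.length
  · rw [if_pos hen,
      if_pos (Ne.symm (runEndFrom_stop arr (arr.getD i 0) i hen)), if_pos hen]
  · rw [if_neg hen, if_neg hen]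

theorem inner_spec (arr : List Int) (ml : Nat) (result : List Int) (i : Nat)
    (hi : i < arr.length) (hml : runEndFrom arr (arr.getD i 0) i - i ≤ ml) (j : Nat)
    (hj : j ≤ runEndFrom arr (arr.getD i 0) i - i - 1) :
    seqs_inner arr ml result i j =
      (result.set (runEndFrom arr (arr.getD i 0) i - i - 1)
         (result.getD (runEndFrom arr (arr.getD i 0) i - i - 1) 0 + 1),
       if runEndFrom arr (arr.getD i 0) i < arr.length then runEndFrom arr (arr.getD i 0) i
       else i + ml) := by
  have hadv := runEndFrom_advance arr i hi
  have hle := runEndFrom_le arr (arr.getD i 0) i (by omega)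
  have H : ∀ d j, runEndFrom arr (arr.getD i 0) i - i - 1 - j ≤ d →
      j ≤ runEndFrom arr (arr.getD i 0) i - i - 1 →
      seqs_inner arr ml result i j =
        (result.set (runEndFrom arr (arr.getD i 0) i - i - 1)
           (result.getD (runEndFrom arr (arr.getD i 0) i - i - 1) 0 + 1),
         if runEndFrom arr (arr.getD i 0) i < arr.length then runEndFrom arr (arr.getD i 0) i
         else i + ml) := by
    intro d
    induction d with
    | zero =>
      intro j h0 hj'
      have : j = runEndFrom arr (arr.getD i 0) i - i - 1 := by omega
      rw [this]
      exact inner_last arr ml result i hi hml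
    | succ d ih =>
      intro j h0 hj'
      rcases Nat.eq_or_lt_of_le hj' with he | hlt
      · rw [he]
        exact inner_last arr ml result i hi hml
      · rw [seqs_inner, dif_pos (show j < ml by omega)]
        show (if i + (j + 1) < arr.length then _ else _) = _
        rw [if_pos (by omega)]
        have heqv : arr.getD (i + (j + 1)) 0 = arr.getD i 0 :=
          runEndFrom_eq_v arr (arr.getD i 0) i (i + (j + 1)) (by omega) (by omega)
        rw [if_neg (fun hne => hne heqv.symm)]
        exact ih (j + 1) (by omega) (by omega)
  exact H (runEndFrom arr (arr.getD i 0) i - i - 1 - j) j le_rfl hj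

-- the outer while-loop of A folds the bucket update over the run list ----------

theorem outer_high (arr : List Int) (ml fuel : Nat) (result : List Int) (i : Nat)
    (h : arr.length ≤ i) : seqs_outer arr ml fuel result i = result := by
  cases fuel with
  | zero => rfl
  | succ fuel => rw [seqs_outer, if_neg (by omega)]

theorem outer_spec (arr : List Int) (fuel i : Nat) (result : List Int)
    (hfuel : (seqs_runs arr i).length ≤ fuel) :
    seqs_outer arr (seqs_maxSeq arr) fuel result i =
      (seqs_runs arr i).foldl
        (fun res r => res.set (r - 1) (res.getD (r - 1) 0 + 1)) result := by
  induction fuel generalizing i result with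
  | zero =>
    have hnil : seqs_runs arr i = [] := List.length_eq_zero_iff.mp (by omega)
    rw [hnil]
    rfl
  | succ fuel ih =>
    by_cases hi : i < arr.length
    · have hadv := runEndFrom_advance arr i hi
      have hle := runEndFrom_le arr (arr.getD i 0) i (by omega)
      have hcons := seqs_runs_pos arr i hi
      have hb := seqs_runs_bounds arr i (runEndFrom arr (arr.getD i 0) i - i)
        (by rw [hcons]; exact List.mem_cons_self)
      rw [seqs_outer, if_pos hi]
      show seqs_outer arr (seqs_maxSeq arr) fuel
        (seqs_inner arr (seqs_maxSeq arr) result i 0).1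
        (seqs_inner arr (seqs_maxSeq arr) result i 0).2 = _
      rw [inner_spec arr (seqs_maxSeq arr) result i hi hb.2 0 (by omega)]
      rw [hcons]
      simp only [List.foldl_cons]
      have hlen : (seqs_runs arr (runEndFrom arr (arr.getD i 0) i)).length ≤ fuel := by
        rw [hcons] at hfuel
        simp only [List.length_cons] at hfuel
        omega
      by_cases hen : runEndFrom arr (arr.getD i 0) i < arr.length
      · rw [if_pos hen]
        exact ih _ _ hlen
      · rw [if_neg hen]
        rw [outer_high arr (seqs_maxSeq arr) fuel _ _ (by omega)]
        rw [seqs_runs_nil arr (runEndFrom arr (arr.getD i 0) i) hen]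
        rfl
    · rw [seqs_runs_nil arr i hi, seqs_outer, if_neg hi]
      rfl

-- A's maximum streak equals the maximum of the run lengths ---------------------

theorem run_fold (arr : List Int) (s : Nat) (hs : s < arr.length) (d acc : Nat)
    (hd : d ≤ runEndFrom arr (arr.getD s 0) s - s) :
    (List.range' (runEndFrom arr (arr.getD s 0) s - d) d).foldl
        (fun m i => Nat.max m (runEndFrom arr (arr.getD i 0) i - i)) acc =
      Nat.max acc d := by
  induction d generalizing acc with
  | zero => simp
  | succ d ih =>
    have hadv := runEndFrom_advance arr s hs
    have hle := runEndFrom_le arr (arr.getD s 0) s (by omega)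
    have h1 : runEndFrom arr (arr.getD s 0) s - (d + 1) + 1 = runEndFrom arr (arr.getD s 0) s - d := by omega
    rw [List.range'_succ, h1]
    simp only [List.foldl_cons]
    have ht : arr.getD (runEndFrom arr (arr.getD s 0) s - (d + 1)) 0 = arr.getD s 0 :=
      runEndFrom_eq_v arr (arr.getD s 0) s _ (by omega) (by omega)
    have hstab : runEndFrom arr (arr.getD (runEndFrom arr (arr.getD s 0) s - (d + 1)) 0) (runEndFrom arr (arr.getD s 0) s - (d + 1)) = runEndFrom arr (arr.getD s 0) s := by
      rw [ht]
      exact runEndFrom_stable arr (arr.getD s 0) s _ (by omega) (by omega)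
    rw [hstab]
    have h2 : runEndFrom arr (arr.getD s 0) s - (runEndFrom arr (arr.getD s 0) s - (d + 1)) = d + 1 := by omega
    rw [h2]
    rw [ih (Nat.max acc (d + 1)) (by omega)]
    show max (max acc (d + 1)) d = max acc (d + 1)
    omega

theorem max_runs (arr : List Int) (s : Nat) (acc : Nat) (hs : s ≤ arr.length) :
    (List.range' s (arr.length - s)).foldl
        (fun m i => Nat.max m (runEndFrom arr (arr.getD i 0) i - i)) acc =
      (seqs_runs arr s).foldl Nat.max acc := by
  have H : ∀ d s acc, arr.length - s ≤ d → s ≤ arr.length →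
      (List.range' s (arr.length - s)).foldl
          (fun m i => Nat.max m (runEndFrom arr (arr.getD i 0) i - i)) acc =
        (seqs_runs arr s).foldl Nat.max acc := by
    intro d
    induction d with
    | zero =>
      intro s acc h1 h2
      rw [seqs_runs_nil arr s (by omega), show arr.length - s = 0 by omega]
      rfl
    | succ d ih =>
      intro s acc h1 h2
      by_cases hlt : s < arr.length
      · have hadv := runEndFrom_advance arr s hlt
        have hle := runEndFrom_le arr (arr.getD s 0) s (by omega)
        have happ : List.range' s (arr.length - s) =
            List.range' s (runEndFrom arr (arr.getD s 0) s - s) ++ List.range' (runEndFrom arr (arr.getD s 0) s) (arr.length - runEndFrom arr (arr.getD s 0) s) := by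
          have h0 : List.range' s (runEndFrom arr (arr.getD s 0) s - s) 1 ++
              List.range' (s + 1 * (runEndFrom arr (arr.getD s 0) s - s)) (arr.length - runEndFrom arr (arr.getD s 0) s) 1 =
                List.range' s ((runEndFrom arr (arr.getD s 0) s - s) + (arr.length - runEndFrom arr (arr.getD s 0) s)) 1 :=
            List.range'_append
          rw [show s + 1 * (runEndFrom arr (arr.getD s 0) s - s) = runEndFrom arr (arr.getD s 0) s by omega,
            show (runEndFrom arr (arr.getD s 0) s - s) + (arr.length - runEndFrom arr (arr.getD s 0) s) = arr.length - s by omega] at h0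
          exact h0.symm
        rw [happ, List.foldl_append]
        have hrf := run_fold arr s hlt (runEndFrom arr (arr.getD s 0) s - s) acc le_rfl
        rw [show runEndFrom arr (arr.getD s 0) s - (runEndFrom arr (arr.getD s 0) s - s) = s by omega] at hrf
        rw [hrf, seqs_runs_pos arr s hlt]
        simp only [List.foldl_cons]
        exact ih (runEndFrom arr (arr.getD s 0) s) (Nat.max acc (runEndFrom arr (arr.getD s 0) s - s)) (by omega) (by omega)
      · rw [seqs_runs_nil arr s hlt, show arr.length - s = 0 by omega]
        rfl
  exact H (arr.length - s) s acc le_rfl hs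

theorem seqs_eq_alt (arr : List Int) : seqs arr = seqs_alt arr := by
  rcases hr : seqs_runs arr 0 with _ | ⟨r0, rest⟩
  · have hl : arr.length = 0 := by
      by_contra hc
      rw [seqs_runs_pos arr 0 (by omega)] at hr
      exact List.cons_ne_nil _ _ hr
    simp [seqs, seqs_alt, hr, hl, seqs_maxSeq, seqs_outer]
  · have hml : seqs_maxSeq arr = rest.foldl Nat.max r0 := by
      rw [seqs_maxSeq_eq_fold, List.range_eq_range']
      have h0 := max_runs arr 0 0 (Nat.zero_le _)
      rw [Nat.sub_zero] at h0
      rw [h0, hr]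
      simp only [List.foldl_cons, Nat.zero_max]
    show seqs_outer arr (seqs_maxSeq arr) arr.length
      (List.replicate (seqs_maxSeq arr) (0 : Int)) 0 = seqs_alt arr
    rw [outer_spec arr arr.length 0 _ (by have := seqs_runs_length arr 0; omega)]
    rw [hr, hml]
    simp only [seqs_alt, hr]

-- ===== VERDICT (by name: the statement is the Claim_ definition above) =====
theorem seqs_spec : Claim_equal_seqs := by
  intro arr _
  unfold Spec_seqs
  exact seqs_eq_alt arr
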